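-- pv_equiv track=rewrite | github.com/wilmurillo-ai/Design-Assistant | .skills/openclaw-skills/skills/jonathangu/crabpath/sims/static_vs_learning.py | _stable_path_index
-- ===== SOURCE A (Python) =====
-- def _stable_path_index(signatures: list[tuple[str, ...]], window: int = 10) -> int | None:
--     if len(signatures) < window:
--         return None
--
--     for start in range(len(signatures) - window + 1):
--         window_set = set(signatures[start : start + window])
--         if len(window_set) == 1:
--             return start + 1
--     return None
-- ===== SOURCE B (Python) =====
-- def _stable_path_index(signatures, window=10):
--     if len(signatures) < window:
--         return None
--     run_start = 0
--     for i in range(len(signatures)):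
--         if signatures[i] != signatures[run_start]:
--             run_start = i
--         if i - run_start + 1 == window:
--             return run_start + 1
--     return None
-- ===== Notes on version B (the rewrite author's own statement) =====
-- stated objective: alternative
-- what changed: Replaces A's per-start construction of a set over each length-`window` slice with a single left-to-right pass that tracks the start of the current run of equal signatures and returns as soon as the run length reaches the window size.
-- intended difference: For negative window, Python's negative slice end makes signatures[start:start+window] a nonempty wrapped segment and A returns an accidental index whenever such a segment is uniform; B returns None there, the intended value since no window of negative size exists. — e.g. on _stable_path_index([["a"], ["a"]], -1): A returns some 1, B returns none
import Mathlib
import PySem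

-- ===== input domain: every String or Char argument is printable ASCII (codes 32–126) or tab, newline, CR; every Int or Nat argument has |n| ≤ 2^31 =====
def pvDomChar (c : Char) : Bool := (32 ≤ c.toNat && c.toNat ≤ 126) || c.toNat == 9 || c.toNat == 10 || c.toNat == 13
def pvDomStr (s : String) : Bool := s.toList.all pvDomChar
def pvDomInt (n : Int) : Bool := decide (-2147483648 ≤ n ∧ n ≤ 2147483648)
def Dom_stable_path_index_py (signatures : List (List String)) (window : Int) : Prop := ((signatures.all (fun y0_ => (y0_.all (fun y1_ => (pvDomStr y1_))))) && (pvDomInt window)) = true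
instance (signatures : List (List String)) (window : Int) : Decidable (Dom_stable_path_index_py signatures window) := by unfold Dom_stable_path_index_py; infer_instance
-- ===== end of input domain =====

-- B replaces A's per-start set construction by a single run-length pass over the signatures
-- (alternative algorithm; same measured cost); for negative window B returns none where A's
-- wrapped slice can yield an accidental index (see D_ below).

-- ===== PORT A =====
def pvA_loop (signatures : List (List String)) (window : Int) : List Int → Option Int
  | [] => none
  | start :: rest =>
    if PySem.Set.len (PySem.Set.ofList (PySem.List.slice signatures (some start) (some (start + window)))) = 1
    then some (start + 1)
    else pvA_loop signatures window rest

def stable_path_index_py (signatures : List (List String)) (window : Int) : Option Int :=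
  if (signatures.length : Int) < window then none
  else pvA_loop signatures window (PySem.List.pyRange 0 ((signatures.length : Int) - window + 1) 1)

-- ===== PORT B =====
def pvB_loop (sigs : List (List String)) (window : Int) (runStart i : Nat) : Option Int :=
  if _h : i < sigs.length then
    let rs := if sigs.getD i [] ≠ sigs.getD runStart [] then i else runStart
    if (i : Int) - (rs : Int) + 1 = window then some ((rs : Int) + 1)
    else pvB_loop sigs window rs (i + 1)
  else none
termination_by sigs.length - i

def stable_path_index_py_alt (signatures : List (List String)) (window : Int) : Option Int :=
  if (signatures.length : Int) < window then none
  else pvB_loop signatures window 0 0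

-- ===== PRECONDITION & SPEC =====
-- For negative window, Python's negative slice end makes signatures[start:start+window] a
-- nonempty wrapped segment; when such a segment is uniform A returns an accidental index,
-- while B returns None, the intended value since no window of negative size exists.
def D_stable_path_index_py (signatures : List (List String)) (window : Int) : Prop :=
  window < 0 ∧ window.natAbs < signatures.length ∧
    ∃ s, s < window.natAbs ∧
      List.IsChain Eq (List.take (signatures.length - window.natAbs) (List.drop s signatures))
instance (signatures : List (List String)) (window : Int) : Decidable (D_stable_path_index_py signatures window) := by unfold D_stable_path_index_py; infer_instance

def Spec_stable_path_index_py (signatures : List (List String)) (window : Int) (out : Option Int) : Prop := ¬ D_stable_path_index_py signatures window → out = stable_path_index_py_alt signatures window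
instance (signatures : List (List String)) (window : Int) (out : Option Int) : Decidable (Spec_stable_path_index_py signatures window out) := by unfold Spec_stable_path_index_py; infer_instance

def pvDiffWitness_stable_path_index_py : List (List String) × Int := ([["a"], ["a"]], -1)
def pvDiffWitnessOut_stable_path_index_py : (Option Int) × (Option Int) := (some 1, none)

-- ===== CLAIM (what is proved, stated in full; the proofs are below) =====
def Claim_unchanged_stable_path_index_py : Prop := ∀ (signatures : List (List String)) (window : Int), Dom_stable_path_index_py signatures window → Spec_stable_path_index_py signatures window (stable_path_index_py signatures window)
def Claim_changed_stable_path_index_py : Prop := Dom_stable_path_index_py (pvDiffWitness_stable_path_index_py.1) (pvDiffWitness_stable_path_index_py.2) ∧ D_stable_path_index_py (pvDiffWitness_stable_path_index_py.1) (pvDiffWitness_stable_path_index_py.2) ∧ stable_path_index_py (pvDiffWitness_stable_path_index_py.1) (pvDiffWitness_stable_path_index_py.2) = pvDiffWitnessOut_stable_path_index_py.1 ∧ stable_path_index_py_alt (pvDiffWitness_stable_path_index_py.1) (pvDiffWitness_stable_path_index_py.2) = pvDiffWitnessOut_stable_path_index_py.2 ∧ pvDiffWitnessOut_stable_path_index_py.1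 ≠ pvDiffWitnessOut_stable_path_index_py.2
def Claim_exact_stable_path_index_py : Prop := ∀ (signatures : List (List String)) (window : Int), Dom_stable_path_index_py signatures window → D_stable_path_index_py signatures window → stable_path_index_py signatures window ≠ stable_path_index_py_alt signatures window

-- ===== LEMMAS AND PROOFS =====


-- "all w entries starting at s are equal to the entry at s" (Bool, for find?)
def pvUb (sigs : List (List String)) (w s : Nat) : Bool :=
  decide (∀ j, j < w → sigs.getD (s + j) [] = sigs.getD s [])

lemma pvA_loop_eq_find (sigs : List (List String)) (window : Int) (starts : List Int) :
    pvA_loop sigs window starts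
      = (starts.find? (fun st => decide (PySem.Set.len (PySem.Set.ofList (PySem.List.slice sigs (some st) (some (st + window)))) = 1))).map (fun st => st + 1) := by
  induction starts with
  | nil => rfl
  | cons a t ih =>
      rw [pvA_loop, List.find?]
      by_cases h : PySem.Set.len (PySem.Set.ofList (PySem.List.slice sigs (some a) (some (a + window)))) = 1
      · rw [if_pos h, decide_eq_true h]
        rfl
      · rw [if_neg h, decide_eq_false h]
        exact ih

lemma pv_find?_congr {α : Type} (p q : α → Bool) : ∀ (l : List α), (∀ x ∈ l, p x = q x) → l.find? p = l.find? q := by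
  intro l
  induction l with
  | nil => intro; rfl
  | cons a t ih =>
      intro h
      rw [List.find?, List.find?, h a (by simp)]
      by_cases hq : q a = true
      · simp [hq]
      · simp only [Bool.not_eq_true] at hq
        simp [hq, ih (fun x hx => h x (by simp [hx]))]

lemma pv_find?_eq_none {α : Type} (p : α → Bool) (l : List α) (h : ∀ x ∈ l, p x = false) : l.find? p = none :=
  List.find?_eq_none.mpr (fun x hx => by simp [h x hx])

lemma pv_find?_range_first (p : Nat → Bool) (m r : Nat) (hr : r < m) (hp : p r = true)
    (hlt : ∀ s, s < r → p s = false) : (List.range m).find? p = some r := by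
  have hm : m = (r + 1) + (m - (r + 1)) := by omega
  rw [hm, List.range_add, List.find?_append]
  have h1 : List.range (r + 1) = List.range r ++ [r] := List.range_succ
  rw [h1, List.find?_append]
  rw [pv_find?_eq_none p (List.range r) (fun x hx => hlt x (List.mem_range.mp hx))]
  simp [List.find?, hp]

lemma pv_len_ofList_one_iff {α : Type} [BEq α] [LawfulBEq α] (l : List α) :
    PySem.Set.len (PySem.Set.ofList l) = 1 ↔ ∃ v, l ≠ [] ∧ ∀ x ∈ l, x = v := by
  have hlen : PySem.Set.len (PySem.Set.ofList l) = ((PySem.Set.ofList l).length : Int) := rfl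
  rw [hlen]
  constructor
  · intro h
    have h1 : (PySem.Set.ofList l).length = 1 := by omega
    obtain ⟨a, ha⟩ := List.length_eq_one_iff.mp h1
    refine ⟨a, ?_, ?_⟩
    · intro hnil
      have : a ∈ PySem.Set.ofList l := by simp [ha]
      rw [PySem.Set.mem_ofList] at this
      simp [hnil] at this
    · intro x hx
      have : x ∈ PySem.Set.ofList l := (PySem.Set.mem_ofList l x).mpr hx
      rw [ha] at this; simpa using this
  · rintro ⟨v, hne, hall⟩
    have hmemv : v ∈ PySem.Set.ofList l := by
      rw [PySem.Set.mem_ofList]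
      cases l with
      | nil => simp at hne
      | cons a t => have := hall a (by simp); simp [← this]
    have hnd := PySem.Set.nodup_ofList l
    have hsub : ∀ x ∈ PySem.Set.ofList l, x = v := fun x hx =>
      hall x ((PySem.Set.mem_ofList l x).mp hx)
    cases hof : PySem.Set.ofList l with
    | nil => rw [hof] at hmemv; simp at hmemv
    | cons b t =>
        rw [hof] at hsub hnd hmemv
        have hb : b = v := hsub b (by simp)
        have ht : t = [] := by
          apply List.eq_nil_iff_forall_not_mem.mpr
          intro y hy
          have hyv : y = v := hsub y (by simp [hy])
          have : b ∉ t := (List.nodup_cons.mp hnd).1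
          rw [hb, ← hyv] at this; exact this hy
        simp [ht]

lemma pv_chunk_one_iff (sigs : List (List String)) (w s : Nat) (hw : 1 ≤ w) (hs : s + w ≤ sigs.length) :
    (PySem.Set.len (PySem.Set.ofList (List.take w (List.drop s sigs))) = 1)
      ↔ (∀ j, j < w → sigs.getD (s + j) [] = sigs.getD s []) := by
  set chunk := List.take w (List.drop s sigs) with hchunk
  have hclen : chunk.length = w := by
    simp [hchunk]; omega
  have hgD : ∀ j (hj : j < w), chunk[j]'(by omega) = sigs.getD (s + j) [] := by
    intro j hj
    rw [List.getD_eq_getElem sigs [] (by omega)]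
    simp only [hchunk, List.getElem_take, List.getElem_drop]
  constructor
  · intro h
    obtain ⟨v, _, hall⟩ := (pv_len_ofList_one_iff chunk).mp h
    intro j hj
    have h1 : sigs.getD (s + j) [] = v := by
      rw [← hgD j hj]
      exact hall _ (List.getElem_mem (by omega))
    have h2 : sigs.getD s [] = v := by
      have h0 : (0 : Nat) < w := hw
      have := hgD 0 h0
      simp only [Nat.add_zero] at this
      rw [← this]
      exact hall _ (List.getElem_mem (by omega))
    rw [h1, h2]
  · intro hU
    rw [pv_len_ofList_one_iff]
    refine ⟨sigs.getD s [], ?_, ?_⟩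
    · intro hnil; rw [hnil] at hclen; simp at hclen; omega
    · intro x hx
      obtain ⟨j, hj, hxj⟩ := List.mem_iff_getElem.mp hx
      rw [hclen] at hj
      rw [← hxj, hgD j hj]
      exact hU j hj


lemma pv_chain_all {α : Type} (l : List α) :
    l.IsChain Eq ↔ ∀ x ∈ l, ∀ y ∈ l, x = y := by
  induction l with
  | nil => simp
  | cons a t ih =>
      rw [List.isChain_cons, ih]
      constructor
      · rintro ⟨hhd, hall⟩
        have hat : ∀ y ∈ t, a = y := by
          intro y hy
          cases t with
          | nil => simp at hy
          | cons c t2 =>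
              have hac : a = c := hhd c (by simp)
              have := hall y hy c (by simp)
              rw [hac, ← this]
        intro x hx y hy
        rcases List.mem_cons.mp hx with hx | hx <;> rcases List.mem_cons.mp hy with hy | hy
        · rw [hx, hy]
        · rw [hx]; exact hat y hy
        · rw [hy]; exact (hat x hx).symm
        · exact hall x hx y hy
      · intro h
        refine ⟨?_, ?_⟩
        · intro b hb
          cases t with
          | nil => simp at hb
          | cons c t2 =>
              simp only [List.head?_cons, Option.mem_some_iff] at hb
              rw [← hb]
              exact h a (by simp) c (by simp)
        · intro x hx y hy
          exact h x (by simp [hx]) y (by simp [hy])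

lemma pv_chain_iff_getD (sigs : List (List String)) (m s : Nat) (hm : 1 ≤ m) (hs : s + m ≤ sigs.length) :
    (List.take m (List.drop s sigs)).IsChain Eq
      ↔ ∀ j, j < m → sigs.getD (s + j) [] = sigs.getD s [] := by
  rw [pv_chain_all, ← pv_chunk_one_iff sigs m s hm hs, pv_len_ofList_one_iff]
  constructor
  · intro h
    refine ⟨(List.take m (List.drop s sigs)).getD 0 [], ?_, ?_⟩
    · intro hnil
      have : (List.take m (List.drop s sigs)).length = 0 := by rw [hnil]; rfl
      simp at this; omega
    · intro x hx
      have h0 : 0 < (List.take m (List.drop s sigs)).length := by simp; omega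
      rw [List.getD_eq_getElem _ [] h0]
      exact h x hx _ (List.getElem_mem h0)
  · rintro ⟨v, _, hall⟩ x hx y hy
    rw [hall x hx, hall y hy]

lemma pv_bridge (sigs : List (List String)) (w s : Nat) (hw : 1 ≤ w) (hs : s + w ≤ sigs.length) :
    (decide (PySem.Set.len (PySem.Set.ofList (PySem.List.slice sigs (some (s : Int)) (some ((s : Int) + (w : Int))))) = 1))
      = pvUb sigs w s := by
  rw [PySem.List.slice_natCast_add, pvUb]
  by_cases hU : ∀ j, j < w → sigs.getD (s + j) [] = sigs.getD s []
  · rw [decide_eq_true hU, decide_eq_true_iff]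
    exact (pv_chunk_one_iff sigs w s hw hs).mpr hU
  · rw [decide_eq_false hU, decide_eq_false_iff_not]
    exact fun h => hU ((pv_chunk_one_iff sigs w s hw hs).mp h)

lemma pv_slice_empty {α : Type} (xs : List α) (a b : Int)
    (h : PySem.List.clampIdx xs.length b ≤ PySem.List.clampIdx xs.length a) :
    PySem.List.slice xs (some a) (some b) = [] := by
  simp only [PySem.List.slice]
  rw [Nat.sub_eq_zero_of_le h]
  exact List.take_zero

lemma pv_slice_neg_seg (sigs : List (List String)) (s : Nat) (window : Int) (_hw : window < 0)
    (hsw : (s : Int) < -window) (hL : 0 < (sigs.length : Int) + window) :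
    PySem.List.slice sigs (some (s : Int)) (some ((s : Int) + window))
      = List.take (sigs.length - window.natAbs) (List.drop s sigs) := by
  have ha : PySem.List.clampIdx sigs.length (s : Int) = s := by
    simp only [PySem.List.clampIdx]; split_ifs <;> omega
  have hb : PySem.List.clampIdx sigs.length ((s : Int) + window)
      = s + (sigs.length - window.natAbs) := by
    simp only [PySem.List.clampIdx]; split_ifs <;> omega
  simp only [PySem.List.slice, ha, hb]
  congr 1
  omega

lemma pvB_loop_nonpos (sigs : List (List String)) (window : Int) (hw : window ≤ 0) :
    ∀ k rs i, sigs.length - i = k → rs ≤ i → pvB_loop sigs window rs i = none := by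
  intro k
  induction k with
  | zero =>
      intro rs i hk _
      rw [pvB_loop]
      simp only [dif_neg (by omega : ¬ i < sigs.length)]
  | succ k ih =>
      intro rs i hk hrs
      rw [pvB_loop]
      simp only [dif_pos (by omega : i < sigs.length)]
      set rs' := if sigs.getD i [] ≠ sigs.getD rs [] then i else rs with hrs'
      have hrs'le : rs' ≤ i := by rw [hrs']; split <;> omega
      rw [if_neg (by omega : ¬ ((i : Int) - (rs' : Int) + 1 = window))]
      exact ih rs' (i + 1) (by omega) (by omega)

lemma pvB_loop_eq (sigs : List (List String)) (w : Nat) (hw : 1 ≤ w) (hwn : w ≤ sigs.length) :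
    ∀ k rs i, sigs.length - i = k → rs ≤ i → i ≤ sigs.length →
    (∀ m, rs ≤ m → m < i → sigs.getD m [] = sigs.getD rs []) →
    (rs = 0 ∨ (rs < i ∧ sigs.getD (rs - 1) [] ≠ sigs.getD rs [])) →
    i - rs < w →
    (∀ s, s + w ≤ i → pvUb sigs w s = false) →
    pvB_loop sigs (w : Int) rs i
      = ((List.range (sigs.length - w + 1)).find? (fun s => pvUb sigs w s)).map (fun s => ((s : Int) + 1)) := by
  intro k
  induction k with
  | zero =>
      intro rs i hk _ hile _ _ _ hfalse
      have hieq : i = sigs.length := by omega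
      rw [pvB_loop]
      simp only [dif_neg (by omega : ¬ i < sigs.length)]
      rw [pv_find?_eq_none _ _ (fun s hs => hfalse s (by
        have := List.mem_range.mp hs; omega))]
      rfl
  | succ k ih =>
      intro rs i hk hrsle hile hrun hbound hlenrun hfalse
      have hilt : i < sigs.length := by omega
      rw [pvB_loop]
      simp only [dif_pos hilt]
      by_cases hne : sigs.getD i [] ≠ sigs.getD rs []
      · -- new run starts at i
        have hrslt : rs < i := by
          rcases Nat.lt_or_ge rs i with h | h
          · exact h
          · exfalso; have : rs = i := by omega
            rw [this] at hne; exact hne rfl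
        have hw2 : 2 ≤ w := by omega
        simp only [if_pos hne]
        rw [if_neg (by omega : ¬ ((i : Int) - (i : Int) + 1 = (w : Int)))]
        apply ih i (i + 1) (by omega) (by omega) (by omega)
        · intro m hm1 hm2
          have : m = i := by omega
          rw [this]
        · right
          refine ⟨by omega, ?_⟩
          have hprev : sigs.getD (i - 1) [] = sigs.getD rs [] := hrun (i - 1) (by omega) (by omega)
          rw [hprev]
          intro hcontra
          exact hne hcontra.symm
        · omega
        · intro s hs
          rcases Nat.lt_or_ge (s + w) (i + 1) with h | h
          · exact hfalse s (by omega)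
          · -- s + w = i + 1; window [s, i] contains i-1 and i which differ
            have hsw : s + w = i + 1 := by omega
            rw [pvUb, decide_eq_false_iff_not]
            intro hU
            have h1 : sigs.getD (s + (i - s)) [] = sigs.getD s [] := hU (i - s) (by omega)
            have h2 : sigs.getD (s + (i - 1 - s)) [] = sigs.getD s [] := hU (i - 1 - s) (by omega)
            have hsle : s ≤ i - 1 := by omega
            have e1 : s + (i - s) = i := by omega
            have e2 : s + (i - 1 - s) = i - 1 := by omega
            rw [e1] at h1; rw [e2] at h2
            have hprev : sigs.getD (i - 1) [] = sigs.getD rs [] := hrun (i - 1) (by omega) (by omega)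
            apply hne
            rw [h1, ← h2, hprev]
      · -- run continues
        simp only [if_neg hne]
        simp only [Ne, not_not] at hne
        by_cases hhit : (i : Int) - (rs : Int) + 1 = (w : Int)
        · rw [if_pos hhit]
          have hhit' : i - rs + 1 = w := by omega
          have hfind : (List.range (sigs.length - w + 1)).find? (fun s => pvUb sigs w s) = some rs := by
            apply pv_find?_range_first
            · omega
            · rw [pvUb, decide_eq_true_iff]
              intro j hj
              rcases Nat.lt_or_ge (rs + j) i with h | h
              · exact hrun (rs + j) (by omega) h
              · have : rs + j = i := by omega
                rw [this]; exact hne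
            · intro s hs
              exact hfalse s (by omega)
          rw [hfind]
          rfl
        · rw [if_neg hhit]
          apply ih rs (i + 1) (by omega) (by omega) (by omega)
          · intro m hm1 hm2
            rcases Nat.lt_or_ge m i with h | h
            · exact hrun m hm1 h
            · have : m = i := by omega
              rw [this]; exact hne
          · rcases hbound with h | ⟨h1, h2⟩
            · left; exact h
            · right; exact ⟨by omega, h2⟩
          · omega
          · intro s hs
            rcases Nat.lt_or_ge (s + w) (i + 1) with h | h
            · exact hfalse s (by omega)
            · have hsw : s + w = i + 1 := by omega
              have hslt : s < rs := by omega
              have hrs1 : 1 ≤ rs := by omega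
              rw [pvUb, decide_eq_false_iff_not]
              intro hU
              have h1 : sigs.getD (s + (rs - s)) [] = sigs.getD s [] := hU (rs - s) (by omega)
              have h2 : sigs.getD (s + (rs - 1 - s)) [] = sigs.getD s [] := hU (rs - 1 - s) (by omega)
              have e1 : s + (rs - s) = rs := by omega
              have e2 : s + (rs - 1 - s) = rs - 1 := by omega
              rw [e1] at h1; rw [e2] at h2
              rcases hbound with h0 | ⟨_, hb2⟩
              · omega
              · exact hb2 (by rw [h1, h2])


lemma pv_eq_of_nonneg (sigs : List (List String)) (window : Int) (hpre : 0 ≤ window) :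
    stable_path_index_py sigs window = stable_path_index_py_alt sigs window := by
  unfold stable_path_index_py stable_path_index_py_alt
  by_cases hlt : (sigs.length : Int) < window
  · simp [hlt]
  · simp only [if_neg hlt]
    set w : Nat := window.toNat with hwdef
    have hwin : window = (w : Int) := by omega
    have hwn : w ≤ sigs.length := by omega
    by_cases hw0 : w = 0
    · -- window = 0: both return none
      have hwin0 : window = 0 := by omega
      rw [hwin0]
      rw [pvA_loop_eq_find]
      rw [pvB_loop_nonpos sigs 0 (by omega) (sigs.length - 0) 0 0 rfl (by omega)]
      rw [pv_find?_eq_none]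
      · rfl
      · intro st hst
        have hst0 : 0 ≤ st := by
          have := PySem.List.mem_pyRange_one.mp hst
          omega
        obtain ⟨m, hm⟩ : ∃ m : Nat, st = (m : Int) := ⟨st.toNat, by omega⟩
        rw [hm]
        have : (m : Int) + 0 = (m : Int) + ((0 : Nat) : Int) := by norm_num
        rw [this, PySem.List.slice_natCast_add]
        simp [PySem.Set.ofList, PySem.Set.len]
    · have hw1 : 1 ≤ w := by omega
      rw [hwin]
      rw [pvA_loop_eq_find]
      have hrange : ((sigs.length : Int) - (w : Int) + 1) = ((sigs.length - w + 1 : Nat) : Int) := by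
        push_cast; omega
      rw [hrange]
      rw [PySem.List.pyRange_one]
      have htn : (((sigs.length - w + 1 : Nat) : Int) - 0).toNat = sigs.length - w + 1 := by omega
      rw [htn]
      rw [List.find?_map]
      rw [Option.map_map]
      rw [pv_find?_congr _ (fun s => pvUb sigs w s) _ (fun s hs => by
        have hsm := List.mem_range.mp hs
        show decide (PySem.Set.len (PySem.Set.ofList (PySem.List.slice sigs (some ((0 : Int) + (s : Int))) (some (((0 : Int) + (s : Int)) + (w : Int))))) = 1) = pvUb sigs w s
        rw [zero_add]
        exact pv_bridge sigs w s hw1 (by omega))]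
      rw [pvB_loop_eq sigs w hw1 hwn (sigs.length - 0) 0 0 rfl (by omega) (by omega)
        (fun m h1 h2 => by omega) (Or.inl rfl) (by omega) (fun s hs => by omega)]
      cases hfind : (List.range (sigs.length - w + 1)).find? (fun s => pvUb sigs w s) with
      | none => rfl
      | some r => simp

lemma pv_B_neg (sigs : List (List String)) (window : Int) (hw : window < 0) :
    stable_path_index_py_alt sigs window = none := by
  unfold stable_path_index_py_alt
  rw [if_neg (by omega : ¬ ((sigs.length : Int) < window))]
  exact pvB_loop_nonpos sigs window (by omega) (sigs.length - 0) 0 0 rfl (by omega)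

lemma pv_A_neg_none (sigs : List (List String)) (window : Int) (hw : window < 0)
    (hnD : ¬ D_stable_path_index_py sigs window) : stable_path_index_py sigs window = none := by
  unfold stable_path_index_py
  rw [if_neg (by omega : ¬ ((sigs.length : Int) < window))]
  rw [pvA_loop_eq_find]
  rw [pv_find?_eq_none]
  · rfl
  · intro st hst
    have hmem := PySem.List.mem_pyRange_one.mp hst
    rw [decide_eq_false_iff_not]
    intro hset
    by_cases hseg : 0 < (sigs.length : Int) + window ∧ st < -window
    · have hst' : st = ((st.toNat : Nat) : Int) := by omega
      rw [hst', pv_slice_neg_seg sigs st.toNat window hw (by omega) hseg.1] at hset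
      have huni := (pv_chunk_one_iff sigs (sigs.length - window.natAbs) st.toNat
        (by omega) (by omega)).mp hset
      refine hnD ⟨hw, by omega, st.toNat, by omega, ?_⟩
      exact (pv_chain_iff_getD sigs (sigs.length - window.natAbs) st.toNat (by omega) (by omega)).mpr huni
    · have hemp : PySem.List.slice sigs (some st) (some (st + window)) = [] := by
        apply pv_slice_empty
        simp only [PySem.List.clampIdx]
        split_ifs <;> omega
      rw [hemp] at hset
      simp [PySem.Set.ofList, PySem.Set.len] at hset

-- ===== VERDICT (by name: the statement is the Claim_ definition above) =====
theorem stable_path_index_py_spec : Claim_unchanged_stable_path_index_py := by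
  intro sigs window _hdom
  unfold Spec_stable_path_index_py
  intro hnD
  rcases lt_or_ge window 0 with hw | hw
  · rw [pv_A_neg_none sigs window hw hnD, pv_B_neg sigs window hw]
  · exact pv_eq_of_nonneg sigs window hw

theorem stable_path_index_py_changed : Claim_changed_stable_path_index_py := by
  unfold Claim_changed_stable_path_index_py
  refine ⟨by decide, by decide, by decide, ?_, by decide⟩
  exact pv_B_neg _ _ (by decide)

theorem stable_path_index_py_tight : Claim_exact_stable_path_index_py := by
  intro sigs window _hdom hD
  obtain ⟨hw, hL, s, hs, huni⟩ := hD
  have huni' := (pv_chain_iff_getD sigs (sigs.length - window.natAbs) s (by omega) (by omega)).mp huni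
  rw [pv_B_neg sigs window hw]
  intro hA
  unfold stable_path_index_py at hA
  rw [if_neg (by omega : ¬ ((sigs.length : Int) < window)), pvA_loop_eq_find] at hA
  have hfind : (PySem.List.pyRange 0 ((sigs.length : Int) - window + 1) 1).find?
      (fun st => decide (PySem.Set.len (PySem.Set.ofList (PySem.List.slice sigs (some st) (some (st + window)))) = 1)) = none := by
    cases h : (PySem.List.pyRange 0 ((sigs.length : Int) - window + 1) 1).find?
        (fun st => decide (PySem.Set.len (PySem.Set.ofList (PySem.List.slice sigs (some st) (some (st + window)))) = 1)) with
    | none => rfl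
    | some r => rw [h] at hA; simp at hA
  have hmem : ((s : Nat) : Int) ∈ PySem.List.pyRange 0 ((sigs.length : Int) - window + 1) 1 := by
    rw [PySem.List.mem_pyRange_one]
    constructor
    · omega
    · omega
  have hnot := List.find?_eq_none.mp hfind _ hmem
  apply hnot
  show decide (PySem.Set.len (PySem.Set.ofList (PySem.List.slice sigs (some ((s : Nat) : Int)) (some (((s : Nat) : Int) + window)))) = 1) = true
  rw [pv_slice_neg_seg sigs s window hw (by omega) (by omega)]
  rw [decide_eq_true_iff]
  exact (pv_chunk_one_iff sigs (sigs.length - window.natAbs) s (by omega) (by omega)).mpr huni'
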